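-- pv_equiv track=rewrite | github.com/mchristosilva/ParquetGen | converte.py | formatar_select
-- ===== SOURCE A (Python) =====
-- def formatar_select(tokens):
--     """
--     Quebra SELECT automaticamente em colunas.
--     """
--     if tokens[0].upper() != "SELECT":
--         return [" ".join(tokens).upper()]
--
--     resultado = ["SELECT"]
--     coluna = []
--
--     for tok in tokens[1:]:
--         if tok == ",":
--             resultado.append("    " + " ".join(coluna).upper() + ",")
--             coluna = []
--         else:
--             coluna.append(tok)
--
--     if coluna:
--         resultado.append("    " + " ".join(coluna).upper())
--
--     return resultado
-- ===== SOURCE B (Python) =====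
-- def _colunas(body):
--     # recursive: split at the first "," token, render the head segment, recurse on the rest
--     if "," not in body:
--         return ["    " + " ".join(body).upper()] if body else []
--     i = body.index(",")
--     return ["    " + " ".join(body[:i]).upper() + ","] + _colunas(body[i + 1:])
--
--
-- def formatar_select(tokens):
--     if tokens[0].upper() != "SELECT":
--         return [" ".join(tokens).upper()]
--     return ["SELECT"] + _colunas(tokens[1:])
-- ===== Notes on version B (the rewrite author's own statement) =====
-- stated objective: alternative
-- what changed: B replaces A's single accumulator loop by a recursive splitter: it locates the first ',' token with list.index, renders the slice before it as one column line, and recurses on the slice after it (final segment rendered without a trailing comma only if non-empty).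
import Mathlib
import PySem

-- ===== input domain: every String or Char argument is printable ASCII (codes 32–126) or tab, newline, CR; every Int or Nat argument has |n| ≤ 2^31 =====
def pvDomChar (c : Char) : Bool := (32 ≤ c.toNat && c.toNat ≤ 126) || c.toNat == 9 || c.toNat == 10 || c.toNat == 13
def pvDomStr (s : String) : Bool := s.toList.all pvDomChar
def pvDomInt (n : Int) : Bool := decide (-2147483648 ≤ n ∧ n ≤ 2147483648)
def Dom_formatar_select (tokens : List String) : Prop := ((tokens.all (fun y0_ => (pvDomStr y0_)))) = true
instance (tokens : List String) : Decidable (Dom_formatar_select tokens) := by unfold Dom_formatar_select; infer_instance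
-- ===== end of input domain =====

-- B replaces A's accumulator loop by a recursive splitter at the first ',' token. Objective: alternative.

-- ===== PORT A =====
-- A's loop: state (resultado, coluna); on "," append the formatted line, else extend coluna.
def formatar_select (tokens : List String) : List String :=
  match tokens with
  | [] => []   -- Python raises IndexError on tokens[0]; excluded by Pre_
  | t0 :: rest =>
    if PySem.Str.upper t0 ≠ "SELECT" then
      [PySem.Str.upper (PySem.Str.join " " (t0 :: rest))]
    else
      let st := rest.foldl
        (fun (st : List String × List String) tok =>
          if tok = "," then
            (st.1 ++ ["    " ++ PySem.Str.upper (PySem.Str.join " " st.2) ++ ","], [])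
          else
            (st.1, st.2 ++ [tok]))
        (["SELECT"], [])
      if st.2 ≠ [] then st.1 ++ ["    " ++ PySem.Str.upper (PySem.Str.join " " st.2)] else st.1

-- ===== PORT B =====
-- _colunas: if "," is in body, render body[:i] at its first index i and recurse on body[i+1:];
-- otherwise one line for body if non-empty. body[:i]/body[i+1:] with i a valid Nat index = take/drop.
def pvColunas (body : List String) : List String :=
  if h : "," ∈ body then
    let i := List.idxOf "," body
    ("    " ++ PySem.Str.upper (PySem.Str.join " " (body.take i)) ++ ",") :: pvColunas (body.drop (i + 1))
  else
    if body ≠ [] then ["    " ++ PySem.Str.upper (PySem.Str.join " " body)] else []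
termination_by body.length
decreasing_by
  have := List.idxOf_lt_length_of_mem h
  simp [List.length_drop]; omega

def formatar_select_alt (tokens : List String) : List String :=
  match tokens with
  | [] => []   -- Python raises IndexError on tokens[0]; excluded by Pre_
  | t0 :: rest =>
    if PySem.Str.upper t0 ≠ "SELECT" then
      [PySem.Str.upper (PySem.Str.join " " (t0 :: rest))]
    else
      ["SELECT"] ++ pvColunas rest

-- ===== PRECONDITION & SPEC =====
-- Pre_ excludes only the empty token list, on which Python A raises IndexError at tokens[0].
def Pre_formatar_select (tokens : List String) : Prop := tokens ≠ []
instance (tokens : List String) : Decidable (Pre_formatar_select tokens) := by unfold Pre_formatar_select; infer_instance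
def pvWitness_formatar_select : List String := ["SELECT", "a", ",", "b"]

def Spec_formatar_select (tokens : List String) (out : List String) : Prop := out = formatar_select_alt tokens
instance (tokens : List String) (out : List String) : Decidable (Spec_formatar_select tokens out) := by unfold Spec_formatar_select; infer_instance

-- ===== CLAIM (what is proved, stated in full; the proofs are below) =====
def Claim_equal_formatar_select : Prop := ∀ (tokens : List String), Dom_formatar_select tokens → Pre_formatar_select tokens → Spec_formatar_select tokens (formatar_select tokens)

-- ===== LEMMAS AND PROOFS =====

-- the rendered line for one comma-free segment
def pvLine (g : List String) : String := "    " ++ PySem.Str.upper (PySem.Str.join " " g)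

theorem pvColunas_comma (col rest : List String) (h : "," ∉ col) :
    pvColunas (col ++ "," :: rest) = (pvLine col ++ ",") :: pvColunas rest := by
  rw [pvColunas]
  have hm : "," ∈ col ++ "," :: rest := by simp
  rw [dif_pos hm]
  have hidx : List.idxOf "," (col ++ "," :: rest) = col.length := by
    rw [List.idxOf_append, if_neg h, List.idxOf_cons_self]; omega
  have hdrop : (col ++ "," :: rest).drop (col.length + 1) = rest := by
    rw [show col ++ "," :: rest = (col ++ [","]) ++ rest by simp,
        show col.length + 1 = (col ++ [","]).length by simp, List.drop_left]
  rw [hidx]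
  simp [pvLine, hdrop]

theorem pvColunas_free (col : List String) (h : "," ∉ col) :
    pvColunas col = if col ≠ [] then [pvLine col] else [] := by
  rw [pvColunas, dif_neg h, pvLine]

-- main invariant: A's fold from state (res, col) equals res ++ pvColunas (col ++ ts)
theorem pv_loop (ts : List String) (res col : List String) (hc : "," ∉ col) :
    (let st := ts.foldl
        (fun (st : List String × List String) tok =>
          if tok = "," then (st.1 ++ [pvLine st.2 ++ ","], []) else (st.1, st.2 ++ [tok]))
        (res, col)
     if st.2 ≠ [] then st.1 ++ [pvLine st.2] else st.1)
    = res ++ pvColunas (col ++ ts) := by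
  induction ts generalizing res col with
  | nil =>
    simp only [List.foldl, List.append_nil, pvColunas_free col hc]
    by_cases h : col = [] <;> simp [h]
  | cons t ts ih =>
    simp only [List.foldl]
    by_cases ht : t = ","
    · subst ht
      rw [if_pos rfl, ih _ [] (by simp), pvColunas_comma col ts hc]
      simp
    · rw [if_neg ht, ih _ (col ++ [t]) (by simp [hc]; exact fun he => ht he.symm), List.append_assoc]
      simp

-- ===== VERDICT (by name: the statement is the Claim_ definition above) =====
theorem formatar_select_spec : Claim_equal_formatar_select := by
  intro tokens _ hpre
  unfold Spec_formatar_select formatar_select formatar_select_alt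
  match tokens with
  | [] => exact absurd rfl hpre
  | t0 :: rest =>
    by_cases hs : PySem.Str.upper t0 ≠ "SELECT"
    · simp [hs]
    · simp only [if_neg hs]
      have := pv_loop rest ["SELECT"] [] (by simp)
      simpa [pvLine] using this
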